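-- pv_equiv track=rewrite | github.com/chirayumaru-crypto/Optum-AI | response_parser.py | _extract_slots
-- ===== SOURCE A (Python) =====
-- from typing import Dict, Any, Optional
--
-- def _extract_slots(step: str, substep: str, utterance: str, intent: str) -> Dict[str, Any]:
--     """Extract information slots from utterance"""
--     slots = {}
--     utterance_lower = utterance.lower()
--
--     # Vision clarity patterns
--     if any(word in utterance_lower for word in ["first", "option 1", "left one", "1st"]):
--         slots["clarity_feedback"] = "first_better"
--     elif any(word in utterance_lower for word in ["second", "option 2", "right one", "2nd"]):
--         slots["clarity_feedback"] = "second_better"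
--     elif any(word in utterance_lower for word in ["both", "same", "equal"]):
--         slots["clarity_feedback"] = "both_same"
--
--     # Color comparison (red/green)
--     if "red" in utterance_lower:
--         slots["color_preference"] = "red"
--     elif "green" in utterance_lower:
--         slots["color_preference"] = "green"
--
--     # Comfort
--     if any(word in utterance_lower for word in ["comfortable", "good", "perfect", "better"]):
--         slots["comfort"] = "comfortable"
--     elif any(word in utterance_lower for word in ["uncomfortable", "strain", "tired"]):
--         slots["comfort"] = "uncomfortable"
--
--     # Health
--     if any(word in utterance_lower for word in ["healthy", "normal", "fine", "okay"]):
--         slots["health_status"] = "normal"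
--
--     # Reading ability
--     if any(word in utterance_lower for word in ["read", "see", "clear"]):
--         slots["reading_ability"] = "able"
--
--     return slots
-- ===== SOURCE B (Python) =====
-- from typing import Dict, Any
--
-- # All keywords, flat: the matcher finds every one of them in a single
-- # position-by-position scan of the lowered utterance.
-- _KEYWORDS = [
--     "first", "option 1", "left one", "1st",
--     "second", "option 2", "right one", "2nd",
--     "both", "same", "equal",
--     "red", "green",
--     "comfortable", "good", "perfect", "better",
--     "uncomfortable", "strain", "tired",
--     "healthy", "normal", "fine", "okay",
--     "read", "see", "clear",
-- ]
--
-- def _extract_slots(step: str, substep: str, utterance: str, intent: str) -> Dict[str, Any]: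
--     """Extract information slots from utterance."""
--     u = utterance.lower()
--     # Phase 1: one left-to-right scan over the positions of u, collecting
--     # the set of all keywords that occur anywhere in it.
--     found = set()
--     for i in range(len(u) + 1):
--         for w in _KEYWORDS:
--             if w not in found and u.startswith(w, i):
--                 found.add(w)
--
--     # Phase 2: resolve each slot from the found-set (first alternative wins).
--     def pick(*alternatives):
--         for value, words in alternatives:
--             if any(w in found for w in words):
--                 return value
--         return None
--
--     slots = {}
--     for slot, value in (
--         ("clarity_feedback", pick(("first_better", ["first", "option 1", "left one", "1st"]),
--                                   ("second_better", ["second", "option 2", "right one", "2nd"]),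
--                                   ("both_same", ["both", "same", "equal"]))),
--         ("color_preference", pick(("red", ["red"]), ("green", ["green"]))),
--         ("comfort", pick(("comfortable", ["comfortable", "good", "perfect", "better"]),
--                          ("uncomfortable", ["uncomfortable", "strain", "tired"]))),
--         ("health_status", pick(("normal", ["healthy", "normal", "fine", "okay"]))),
--         ("reading_ability", pick(("able", ["read", "see", "clear"]))),
--     ):
--         if value is not None:
--             slots[slot] = value
--     return slots
-- ===== Notes on version B (the rewrite author's own statement) =====
-- stated objective: alternative
-- what changed: Instead of A's 21 independent substring searches inside if/elif chains, B makes one position-by-position scan of the lowered utterance collecting the set of all matched keywords (via startswith at each offset), then resolves each slot from that found-set by first-alternative-wins.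
import Mathlib
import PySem

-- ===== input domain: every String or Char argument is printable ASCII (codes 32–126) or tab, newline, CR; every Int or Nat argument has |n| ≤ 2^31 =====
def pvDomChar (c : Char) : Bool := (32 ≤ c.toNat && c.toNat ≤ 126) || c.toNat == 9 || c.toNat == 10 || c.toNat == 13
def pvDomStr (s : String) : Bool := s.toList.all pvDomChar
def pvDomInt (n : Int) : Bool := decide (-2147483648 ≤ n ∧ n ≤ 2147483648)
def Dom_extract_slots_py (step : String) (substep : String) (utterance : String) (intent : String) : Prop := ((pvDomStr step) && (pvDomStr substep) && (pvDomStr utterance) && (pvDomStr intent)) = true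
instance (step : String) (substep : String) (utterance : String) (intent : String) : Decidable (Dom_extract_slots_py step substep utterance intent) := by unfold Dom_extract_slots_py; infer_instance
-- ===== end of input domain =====

-- B replaces A's 21 independent substring searches with one positional scan of the lowered
-- utterance that collects the set of matched keywords, then resolves slots from that set
-- (alternative algorithm, same cost).


-- ===== PORT A =====
def extract_slots_py (step : String) (substep : String) (utterance : String) (intent : String) : List (String × String) :=
  let u := PySem.Str.lower utterance
  let slots : PySem.Dict String String := PySem.Dict.empty
  let slots :=
    if ["first", "option 1", "left one", "1st"].any (fun w => PySem.Str.isIn w u) then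
      slots.insert "clarity_feedback" "first_better"
    else if ["second", "option 2", "right one", "2nd"].any (fun w => PySem.Str.isIn w u) then
      slots.insert "clarity_feedback" "second_better"
    else if ["both", "same", "equal"].any (fun w => PySem.Str.isIn w u) then
      slots.insert "clarity_feedback" "both_same"
    else slots
  let slots :=
    if PySem.Str.isIn "red" u then slots.insert "color_preference" "red"
    else if PySem.Str.isIn "green" u then slots.insert "color_preference" "green"
    else slots
  let slots :=
    if ["comfortable", "good", "perfect", "better"].any (fun w => PySem.Str.isIn w u) then
      slots.insert "comfort" "comfortable"
    else if ["uncomfortable", "strain", "tired"].any (fun w => PySem.Str.isIn w u) then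
      slots.insert "comfort" "uncomfortable"
    else slots
  let slots :=
    if ["healthy", "normal", "fine", "okay"].any (fun w => PySem.Str.isIn w u) then
      slots.insert "health_status" "normal"
    else slots
  let slots :=
    if ["read", "see", "clear"].any (fun w => PySem.Str.isIn w u) then
      slots.insert "reading_ability" "able"
    else slots
  slots.items

-- ===== PORT B =====
-- the flat keyword list from Source B
def kwAll : List String :=
  ["first", "option 1", "left one", "1st",
   "second", "option 2", "right one", "2nd",
   "both", "same", "equal",
   "red", "green",
   "comfortable", "good", "perfect", "better",
   "uncomfortable", "strain", "tired",
   "healthy", "normal", "fine", "okay",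
   "read", "see", "clear"]

-- phase 1 of Source B: one scan over the positions of u; 'u.startswith(w, i)' with 0 ≤ i is
-- exactly 'w.toList.isPrefixOf (u.drop i)' (exact by hand: PySem has no start-index startswith)
def scanFound (u : List Char) : PySem.Set String :=
  (List.range (u.length + 1)).foldl
    (fun found i =>
      kwAll.foldl
        (fun fd w =>
          if !(PySem.Set.contains fd w) && w.toList.isPrefixOf (u.drop i) then
            PySem.Set.add fd w
          else fd)
        found)
    PySem.Set.empty

-- phase 2 of Source B: pick(*alternatives) — first alternative whose word list meets the found-set
def pickRule (found : PySem.Set String) (alternatives : List (String × List String)) : Option String :=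
  match alternatives.find? (fun r => r.2.any (fun w => PySem.Set.contains found w)) with
  | some r => some r.1
  | none => none

def extract_slots_py_alt (step : String) (substep : String) (utterance : String) (intent : String) : List (String × String) :=
  let u := PySem.Str.lower utterance
  let found := scanFound u.toList
  [("clarity_feedback",
      pickRule found
        [("first_better", ["first", "option 1", "left one", "1st"]),
         ("second_better", ["second", "option 2", "right one", "2nd"]),
         ("both_same", ["both", "same", "equal"])]),
   ("color_preference", pickRule found [("red", ["red"]), ("green", ["green"])]),
   ("comfort",
      pickRule found
        [("comfortable", ["comfortable", "good", "perfect", "better"]),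
         ("uncomfortable", ["uncomfortable", "strain", "tired"])]),
   ("health_status", pickRule found [("normal", ["healthy", "normal", "fine", "okay"])]),
   ("reading_ability", pickRule found [("able", ["read", "see", "clear"])])].foldl
    (fun slots e =>
      match e.2 with
      | some v => slots ++ [(e.1, v)]
      | none => slots)
    []

-- ===== PRECONDITION & SPEC =====
def Spec_extract_slots_py (step : String) (substep : String) (utterance : String) (intent : String) (out : List (String × String)) : Prop := out = extract_slots_py_alt step substep utterance intent
instance (step : String) (substep : String) (utterance : String) (intent : String) (out : List (String × String)) : Decidable (Spec_extract_slots_py step substep utterance intent out) := by unfold Spec_extract_slots_py; infer_instance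

-- ===== CLAIM (what is proved, stated in full; the proofs are below) =====
def Claim_equal_extract_slots_py : Prop := ∀ (step : String) (substep : String) (utterance : String) (intent : String), Dom_extract_slots_py step substep utterance intent → Spec_extract_slots_py step substep utterance intent (extract_slots_py step substep utterance intent)

-- ===== LEMMAS AND PROOFS =====

-- one step of the inner keyword loop
theorem mem_scan_step (u : List Char) (i : Nat) (fd : PySem.Set String) (k w : String) :
    w ∈ (if !(PySem.Set.contains fd k) && k.toList.isPrefixOf (u.drop i) then
          PySem.Set.add fd k else fd)
      ↔ w ∈ fd ∨ (w = k ∧ k.toList <+: u.drop i) := by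
  split_ifs with h
  · simp only [Bool.and_eq_true, Bool.not_eq_true', List.isPrefixOf_iff_prefix] at h
    rw [PySem.Set.mem_add]
    exact ⟨fun hh => hh.elim Or.inl (fun he => Or.inr ⟨he, h.2⟩),
           fun hh => hh.elim Or.inl (fun he => Or.inr he.1)⟩
  · simp only [Bool.and_eq_true, Bool.not_eq_true', List.isPrefixOf_iff_prefix, not_and] at h
    refine ⟨Or.inl, fun hh => hh.elim id (fun he => ?_)⟩
    have hk : k ∈ fd := by
      by_contra hk
      have hcf : PySem.Set.contains fd k = false := by
        cases hcc : PySem.Set.contains fd k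
        · rfl
        · exact absurd ((PySem.Set.contains_iff fd k).mp hcc) hk
      exact h hcf he.2
    exact he.1 ▸ hk

-- inner keyword loop: membership = old membership ∨ (keyword ∧ prefix at this position)
theorem mem_scan_inner (u : List Char) (i : Nat) (ks : List String) (fd : PySem.Set String) (w : String) :
    w ∈ ks.foldl
        (fun fd w =>
          if !(PySem.Set.contains fd w) && w.toList.isPrefixOf (u.drop i) then
            PySem.Set.add fd w
          else fd) fd
      ↔ w ∈ fd ∨ (w ∈ ks ∧ w.toList <+: u.drop i) := by
  induction ks generalizing fd with
  | nil => simp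
  | cons k ks ih =>
    rw [List.foldl_cons, ih, mem_scan_step]
    simp only [List.mem_cons]
    constructor
    · rintro ((h | ⟨rfl, hp⟩) | ⟨hk, hp⟩)
      · exact Or.inl h
      · exact Or.inr ⟨Or.inl rfl, hp⟩
      · exact Or.inr ⟨Or.inr hk, hp⟩
    · rintro (h | ⟨rfl | hk, hp⟩)
      · exact Or.inl (Or.inl h)
      · exact Or.inl (Or.inr ⟨rfl, hp⟩)
      · exact Or.inr ⟨hk, hp⟩

-- outer position loop over an arbitrary index list
theorem mem_scan_outer (u : List Char) (is : List Nat) (fd : PySem.Set String) (w : String) :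
    w ∈ is.foldl
        (fun found i =>
          kwAll.foldl
            (fun fd w =>
              if !(PySem.Set.contains fd w) && w.toList.isPrefixOf (u.drop i) then
                PySem.Set.add fd w
              else fd) found) fd
      ↔ w ∈ fd ∨ (w ∈ kwAll ∧ ∃ i ∈ is, w.toList <+: u.drop i) := by
  induction is generalizing fd with
  | nil => simp
  | cons i is ih =>
    rw [List.foldl_cons, ih]
    rw [mem_scan_inner]
    simp only [List.mem_cons]
    constructor
    · rintro ((h | h) | h)
      · exact Or.inl h
      · exact Or.inr ⟨h.1, i, Or.inl rfl, h.2⟩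
      · obtain ⟨hk, j, hj, hp⟩ := h
        exact Or.inr ⟨hk, j, Or.inr hj, hp⟩
    · rintro (h | ⟨hk, j, rfl | hj, hp⟩)
      · exact Or.inl (Or.inl h)
      · exact Or.inl (Or.inr ⟨hk, hp⟩)
      · exact Or.inr ⟨hk, j, hj, hp⟩

-- the found-set is exactly substring membership, for nonempty keywords in the table
theorem contains_scanFound (s : String) (w : String) (hk : w ∈ kwAll) (hne : w.toList ≠ []) :
    PySem.Set.contains (scanFound s.toList) w = PySem.Str.isIn w s := by
  have h1 : w ∈ scanFound s.toList ↔ w ∈ kwAll ∧ ∃ i ∈ List.range (s.toList.length + 1), w.toList <+: s.toList.drop i := by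
    unfold scanFound
    rw [mem_scan_outer]
    simp [PySem.Set.empty]
  have h2 : (∃ i ∈ List.range (s.toList.length + 1), w.toList <+: s.toList.drop i) ↔ PySem.Str.isIn w s = true := by
    rw [show PySem.Str.isIn w s = PySem.Chars.isIn w.toList s.toList from by simp [pysem]]
    rw [← PySem.Chars.exists_prefix_drop_iff_isIn]
    constructor
    · rintro ⟨i, _, hp⟩; exact ⟨i, hp⟩
    · rintro ⟨j, hp⟩
      by_cases hj : j < s.toList.length + 1
      · exact ⟨j, List.mem_range.mpr hj, hp⟩
      · exfalso
        have : s.toList.drop j = [] := List.drop_eq_nil_of_le (by omega)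
        rw [this] at hp
        exact hne (List.prefix_nil.mp hp)
  by_cases h : PySem.Str.isIn w s
  · rw [h]
    exact (PySem.Set.contains_iff _ _).mpr (h1.mpr ⟨hk, h2.mpr h⟩)
  · simp only [Bool.not_eq_true] at h
    rw [h]
    by_contra hc
    simp only [Bool.not_eq_false] at hc
    have := h2.mp (h1.mp ((PySem.Set.contains_iff _ _).mp hc)).2
    rw [h] at this; exact absurd this (by simp)

-- ===== VERDICT (by name: the statement is the Claim_ definition above) =====
theorem extract_slots_py_spec : Claim_equal_extract_slots_py := by
  intro step substep utterance intent _
  unfold Spec_extract_slots_py extract_slots_py extract_slots_py_alt pickRule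
  have hc : ∀ w ∈ kwAll, PySem.Set.contains (scanFound (PySem.Str.lower utterance).toList) w = PySem.Str.isIn w (PySem.Str.lower utterance) := by
    intro w hw
    refine contains_scanFound _ w hw ?_
    fin_cases hw <;> decide
  simp only [List.find?, List.any_cons, List.any_nil, Bool.or_false,
    hc "first" (by decide), hc "option 1" (by decide), hc "left one" (by decide), hc "1st" (by decide),
    hc "second" (by decide), hc "option 2" (by decide), hc "right one" (by decide), hc "2nd" (by decide),
    hc "both" (by decide), hc "same" (by decide), hc "equal" (by decide),
    hc "red" (by decide), hc "green" (by decide),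
    hc "comfortable" (by decide), hc "good" (by decide), hc "perfect" (by decide), hc "better" (by decide),
    hc "uncomfortable" (by decide), hc "strain" (by decide), hc "tired" (by decide),
    hc "healthy" (by decide), hc "normal" (by decide), hc "fine" (by decide), hc "okay" (by decide),
    hc "read" (by decide), hc "see" (by decide), hc "clear" (by decide)]
  generalize (PySem.Str.isIn "first" (PySem.Str.lower utterance) || (PySem.Str.isIn "option 1" (PySem.Str.lower utterance) || (PySem.Str.isIn "left one" (PySem.Str.lower utterance) || (PySem.Str.isIn "1st" (PySem.Str.lower utterance))))) = g1
  generalize (PySem.Str.isIn "second" (PySem.Str.lower utterance) || (PySem.Str.isIn "option 2" (PySem.Str.lower utterance) || (PySem.Str.isIn "right one" (PySem.Str.lower utterance) || (PySem.Str.isIn "2nd" (PySem.Str.lower utterance))))) = g2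
  generalize (PySem.Str.isIn "both" (PySem.Str.lower utterance) || (PySem.Str.isIn "same" (PySem.Str.lower utterance) || (PySem.Str.isIn "equal" (PySem.Str.lower utterance)))) = g3
  generalize (PySem.Str.isIn "red" (PySem.Str.lower utterance)) = g4
  generalize (PySem.Str.isIn "green" (PySem.Str.lower utterance)) = g5
  generalize (PySem.Str.isIn "comfortable" (PySem.Str.lower utterance) || (PySem.Str.isIn "good" (PySem.Str.lower utterance) || (PySem.Str.isIn "perfect" (PySem.Str.lower utterance) || (PySem.Str.isIn "better" (PySem.Str.lower utterance))))) = g6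
  generalize (PySem.Str.isIn "uncomfortable" (PySem.Str.lower utterance) || (PySem.Str.isIn "strain" (PySem.Str.lower utterance) || (PySem.Str.isIn "tired" (PySem.Str.lower utterance)))) = g7
  generalize (PySem.Str.isIn "healthy" (PySem.Str.lower utterance) || (PySem.Str.isIn "normal" (PySem.Str.lower utterance) || (PySem.Str.isIn "fine" (PySem.Str.lower utterance) || (PySem.Str.isIn "okay" (PySem.Str.lower utterance))))) = g8
  generalize (PySem.Str.isIn "read" (PySem.Str.lower utterance) || (PySem.Str.isIn "see" (PySem.Str.lower utterance) || (PySem.Str.isIn "clear" (PySem.Str.lower utterance)))) = g9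
  revert g1 g2 g3 g4 g5 g6 g7 g8 g9
  decide
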